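-- pv_equiv track=rewrite | github.com/revtiraman/AdaptiveHybrid-RAG-System | advanced-hybrid-rag/backend/reasoning/literature_review_generator.py | generate
-- ===== SOURCE A (Python) =====
-- from collections import defaultdict
--
-- def generate(topic: str, papers: list[dict], sections: list[str] | None = None) -> str:
--     sections = sections or ["background", "methods", "results", "gaps"]
--     grouped = defaultdict(list)
--     for paper in papers:
--         grouped[paper.get("cluster", "general")].append(paper)
--
--     out = [f"# Literature Review: {topic}"]
--     for sec in sections:
--         out.append(f"\n## {sec.title()}")
--         for cluster, items in grouped.items():
--             out.append(f"\n### {cluster.title()}")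
--             for item in items[:5]:
--                 out.append(f"- {item.get('title', 'Untitled')}: {item.get('summary', 'No summary available.')}")
--     return "\n".join(out)
-- ===== SOURCE B (Python) =====
-- def generate(topic: str, papers: list[dict], sections: list[str] | None = None) -> str:
--     sections = sections or ["background", "methods", "results", "gaps"]
--     # distinct cluster keys in first-occurrence order -- no grouping dict
--     keys = []
--     for p in papers:
--         k = p.get("cluster", "general")
--         if k not in keys:
--             keys.append(k)
--     # the section-invariant body: per cluster, re-scan papers, stop after 5 matches
--     body = []
--     for k in keys:
--         body.append("\n### " + k.title())
--         shown = 0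
--         for p in papers:
--             if p.get("cluster", "general") == k:
--                 body.append("- %s: %s" % (p.get("title", "Untitled"),
--                                           p.get("summary", "No summary available.")))
--                 shown += 1
--                 if shown == 5:
--                     break
--     lines = ["# Literature Review: " + topic]
--     for sec in sections:
--         lines.append("\n## " + sec.title())
--         lines.extend(body)
--     return "\n".join(lines)
-- ===== Notes on version B (the rewrite author's own statement) =====
-- stated objective: alternative
-- what changed: B drops A's grouping dict entirely: it collects the distinct cluster keys in first-occurrence order, re-scans the paper list per cluster stopping after 5 matches, builds the section-invariant body once and splices it after each section header instead of re-walking every cluster and item per section.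
import Mathlib
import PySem

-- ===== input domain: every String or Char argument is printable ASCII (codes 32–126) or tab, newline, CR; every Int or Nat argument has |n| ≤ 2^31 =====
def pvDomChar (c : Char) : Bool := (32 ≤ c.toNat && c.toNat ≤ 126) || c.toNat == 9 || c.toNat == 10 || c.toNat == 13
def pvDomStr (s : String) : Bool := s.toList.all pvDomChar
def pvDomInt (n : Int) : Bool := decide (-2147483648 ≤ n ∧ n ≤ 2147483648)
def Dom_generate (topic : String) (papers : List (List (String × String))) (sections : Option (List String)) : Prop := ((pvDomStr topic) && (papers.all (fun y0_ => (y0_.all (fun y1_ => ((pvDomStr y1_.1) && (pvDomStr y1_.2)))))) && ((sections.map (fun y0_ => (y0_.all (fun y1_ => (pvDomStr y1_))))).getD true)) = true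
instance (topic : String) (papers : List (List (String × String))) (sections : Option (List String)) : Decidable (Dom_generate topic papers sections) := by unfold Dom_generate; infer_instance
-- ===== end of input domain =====

-- B drops A's grouping dict: it collects distinct cluster keys in first-occurrence order,
-- re-scans the paper list per cluster stopping after 5 matches, builds the section-invariant
-- body once and splices it after each section header (alternative algorithm, similar cost).

-- ----- shared helpers (ports of Python built-ins both versions call) -----

-- str.title(): hand-ported; exact on the ASCII domain (an alpha char is upcased after a
-- non-alpha char, downcased after an alpha char; other chars pass through).
def pyTitleChars : Bool → List Char → List Char
  | _, [] => []
  | prev, c :: cs =>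
    if c.isAlpha then (if prev then c.toLower else c.toUpper) :: pyTitleChars true cs
    else c :: pyTitleChars false cs

def pyTitle (s : String) : String := String.ofList (pyTitleChars false s.toList)

-- paper.get(k, dflt) on a Python dict given as an association list
def paperGet (paper : List (String × String)) (k dflt : String) : String :=
  (PySem.Dict.ofList paper).getD k dflt

def defaultSections : List String := ["background", "methods", "results", "gaps"]

-- sections or ["background", ...] : None and the empty list are falsy
def effSections (sections : Option (List String)) : List String :=
  match sections with
  | none => defaultSections
  | some [] => defaultSections
  | some s => s

def clusterKey (p : List (String × String)) : String := paperGet p "cluster" "general"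

def itemLine (it : List (String × String)) : String :=
  "- " ++ paperGet it "title" "Untitled" ++ ": " ++ paperGet it "summary" "No summary available."

-- ===== PORT A =====
def generate (topic : String) (papers : List (List (String × String))) (sections : Option (List String)) : String :=
  let secs := effSections sections
  -- grouped = defaultdict(list); grouped[paper.get("cluster","general")].append(paper)
  let grouped : PySem.Dict String (List (List (String × String))) :=
    papers.foldl (fun d p => d.modify (clusterKey p) [] (fun l => l ++ [p]))
      PySem.Dict.empty
  let out :=
    secs.foldl (fun acc sec =>
        grouped.items.foldl (fun acc2 ci =>
            (ci.2.take 5).foldl (fun acc3 it => acc3 ++ [itemLine it])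
              (acc2 ++ ["\n### " ++ pyTitle ci.1]))
          (acc ++ ["\n## " ++ pyTitle sec]))
      ["# Literature Review: " ++ topic]
  PySem.Str.join "\n" out

-- ===== PORT B =====
-- inner loop of B: scan papers for cluster k, counting matches, break when shown == 5
def scanCluster (k : String) : List (List (String × String)) → Nat → List String
  | [], _ => []
  | p :: ps, shown =>
    if clusterKey p == k then
      itemLine p :: (if shown + 1 == 5 then [] else scanCluster k ps (shown + 1))
    else scanCluster k ps shown

def generate_alt (topic : String) (papers : List (List (String × String))) (sections : Option (List String)) : String :=
  let secs := effSections sections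
  -- keys = []; for p in papers: if k not in keys: keys.append(k)
  let keys : PySem.Set String :=
    papers.foldl (fun ks p => PySem.Set.add ks (clusterKey p)) PySem.Set.empty
  -- the section-invariant body, built once
  let body := keys.flatMap (fun k => ("\n### " ++ pyTitle k) :: scanCluster k papers 0)
  let block := secs.flatMap (fun sec => ("\n## " ++ pyTitle sec) :: body)
  PySem.Str.join "\n" (("# Literature Review: " ++ topic) :: block)

-- ===== PRECONDITION & SPEC =====
def Spec_generate (topic : String) (papers : List (List (String × String))) (sections : Option (List String)) (out : String) : Prop := out = generate_alt topic papers sections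
instance (topic : String) (papers : List (List (String × String))) (sections : Option (List String)) (out : String) : Decidable (Spec_generate topic papers sections out) := by unfold Spec_generate; infer_instance

-- ===== CLAIM =====
def Claim_equal_generate : Prop := ∀ (topic : String) (papers : List (List (String × String))) (sections : Option (List String)), Dom_generate topic papers sections → Spec_generate topic papers sections (generate topic papers sections)

-- ===== LEMMAS AND PROOFS =====

-- middle loop of A (clusters, with the item loop inside) = flatMap form
theorem mid_loop (cis : List (String × List (List (String × String)))) (acc : List String) :
    cis.foldl (fun acc2 ci =>
        (ci.2.take 5).foldl (fun acc3 it => acc3 ++ [itemLine it])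
          (acc2 ++ ["\n### " ++ pyTitle ci.1])) acc
      = acc ++ cis.flatMap (fun ci => ("\n### " ++ pyTitle ci.1) :: (ci.2.take 5).map itemLine) := by
  induction cis generalizing acc with
  | nil => simp
  | cons c cs ih =>
    simp only [List.foldl_cons, List.flatMap_cons,
      PySem.List.foldl_append_singleton_eq_map]
    simp [List.flatMap_def]

-- outer loop of A (sections) = flatMap form
theorem outer_loop (secs : List String)
    (cis : List (String × List (List (String × String)))) (acc : List String) :
    secs.foldl (fun acc sec =>
        cis.foldl (fun acc2 ci =>
            (ci.2.take 5).foldl (fun acc3 it => acc3 ++ [itemLine it])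
              (acc2 ++ ["\n### " ++ pyTitle ci.1]))
          (acc ++ ["\n## " ++ pyTitle sec])) acc
      = acc ++ secs.flatMap (fun sec => ("\n## " ++ pyTitle sec) ::
          cis.flatMap (fun ci => ("\n### " ++ pyTitle ci.1) :: (ci.2.take 5).map itemLine)) := by
  induction secs generalizing acc with
  | nil => simp
  | cons s ss ih =>
    simp only [List.foldl_cons, List.flatMap_cons, mid_loop]
    simp [List.flatMap_def]

-- A's grouped dict, characterised: items = distinct keys in first-occurrence order,
-- each paired with the filter of papers having that key
theorem grouped_items (papers : List (List (String × String))) :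
    (papers.foldl (fun d p => d.modify (clusterKey p) [] (fun l => l ++ [p]))
      (PySem.Dict.empty : PySem.Dict String (List (List (String × String))))).items
    = (PySem.Set.ofList (papers.map clusterKey)).map
        (fun k => (k, papers.filter (fun p => clusterKey p == k))) := by
  set d := papers.foldl (fun d p => d.modify (clusterKey p) [] (fun l => l ++ [p]))
    (PySem.Dict.empty : PySem.Dict String (List (List (String × String)))) with hd
  have hnd : d.keys.Nodup := by
    rw [hd]
    exact PySem.Dict.nodup_keys_foldl_modify_key papers clusterKey []
      (fun d p => fun l => l ++ [p]) PySem.Dict.empty (by simp [PySem.Dict.empty])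
  have hkeys : d.keys = PySem.Set.ofList (papers.map clusterKey) := by
    rw [hd, PySem.Dict.keys_foldl_modify_key]
    rw [show (PySem.Dict.empty : PySem.Dict String (List (List (String × String)))).keys = [] from rfl,
      PySem.Set.update_nil_left]
  have hval : ∀ k, d.getD k [] = papers.filter (fun p => clusterKey p == k) := by
    intro k
    have hfold : d = (papers.map (fun p => (clusterKey p, p))).foldl
        (fun d q => d.modify q.1 [] (fun l => l ++ [q.2])) PySem.Dict.empty := by
      rw [hd, List.foldl_map]
    rw [hfold, PySem.Dict.getD_foldl_modify_append]
    simp [List.filter_map, List.map_map, Function.comp_def]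
  rw [PySem.Dict.items_eq_map_keys d hnd [], hkeys]
  exact List.map_congr_left (fun k _ => by rw [hval k])

-- B's key-collection loop builds exactly the distinct keys in first-occurrence order
theorem keys_loop (papers : List (List (String × String))) :
    papers.foldl (fun ks p => PySem.Set.add ks (clusterKey p)) PySem.Set.empty
      = PySem.Set.ofList (papers.map clusterKey) := by
  rw [← PySem.Set.update_map_eq_foldl_add]
  exact PySem.Set.update_nil_left _

-- B's counting scan = take (5 - shown) of the filter, for shown < 5
theorem scanCluster_eq (k : String) (papers : List (List (String × String))) :
    ∀ shown : Nat, shown < 5 →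
    scanCluster k papers shown
      = ((papers.filter (fun p => clusterKey p == k)).take (5 - shown)).map itemLine := by
  induction papers with
  | nil => intro shown _; simp [scanCluster]
  | cons p ps ih =>
    intro shown hs
    simp only [scanCluster, List.filter_cons]
    by_cases h : clusterKey p == k
    · simp only [h, if_true]
      have htake : (5 - shown) = (5 - (shown + 1)) + 1 := by omega
      rw [htake, List.take_succ_cons, List.map_cons]
      by_cases h5 : shown + 1 = 5
      · simp [h5]
      · have h5' : (shown + 1 == 5) = false := by simp only [beq_eq_false_iff_ne, ne_eq]; omega
        simp only [h5', Bool.false_eq_true, if_false]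
        rw [ih (shown + 1) (by omega)]
    · have hf : (clusterKey p == k) = false := by simp_all
      simp only [hf, Bool.false_eq_true, if_false]
      exact ih shown hs

-- ===== VERDICT =====
theorem generate_spec : Claim_equal_generate := by
  intro topic papers sections _
  show generate topic papers sections = generate_alt topic papers sections
  have hfun : (fun k => ("\n### " ++ pyTitle k) ::
        ((papers.filter (fun p => clusterKey p == k)).take 5).map itemLine)
      = (fun k => ("\n### " ++ pyTitle k) :: scanCluster k papers 0) :=
    funext (fun k => by rw [scanCluster_eq k papers 0 (by omega)])
  simp only [generate, generate_alt]
  rw [outer_loop, List.singleton_append, grouped_items, keys_loop, List.flatMap_map]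
  simp only [hfun]
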